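-- pv_equiv track=rewrite | github.com/sanjakhmedov/python_seminars | sem_5/inclass/task_2.py | order_sublist
-- ===== SOURCE A (Python) =====
-- def order_sublist(ls):
--     res = []
--     for i in range(len(ls)):
--         temp = ls[i]
--         temp_ls = [temp]
--         for j in range(i, len(ls)):
--             if ls[j] > temp:
--                 temp_ls.append(ls[j])
--                 temp = ls[j]
--         if len(temp_ls) > 1:
--             res.append(temp_ls)
--     return res
-- ===== SOURCE B (Python) =====
-- def order_sublist(ls):
--     # One right-to-left pass with a monotonic stack of (value, chain) pairs:
--     # chain is the greedy increasing run starting at that value, so each start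
--     # index reuses the already-built chain of its next greater element.
--     stack = []    # top at the end; values strictly increase toward the top
--     chains = []
--     for x in reversed(ls):
--         while stack and stack[-1][0] <= x:
--             stack.pop()
--         chain = [x] + (stack[-1][1] if stack else [])
--         stack.append((x, chain))
--         chains.append(chain)
--     chains.reverse()
--     return [c for c in chains if len(c) > 1]
-- ===== Notes on version B (the rewrite author's own statement) =====
-- stated objective: alternative
-- what changed: Replaces the per-start-index running-maximum rescan of the whole suffix by one right-to-left pass with a monotonic stack of (value, chain) pairs, so each start index's greedy chain is built by sharing the memoized chain of its next greater element.
import Mathlib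
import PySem

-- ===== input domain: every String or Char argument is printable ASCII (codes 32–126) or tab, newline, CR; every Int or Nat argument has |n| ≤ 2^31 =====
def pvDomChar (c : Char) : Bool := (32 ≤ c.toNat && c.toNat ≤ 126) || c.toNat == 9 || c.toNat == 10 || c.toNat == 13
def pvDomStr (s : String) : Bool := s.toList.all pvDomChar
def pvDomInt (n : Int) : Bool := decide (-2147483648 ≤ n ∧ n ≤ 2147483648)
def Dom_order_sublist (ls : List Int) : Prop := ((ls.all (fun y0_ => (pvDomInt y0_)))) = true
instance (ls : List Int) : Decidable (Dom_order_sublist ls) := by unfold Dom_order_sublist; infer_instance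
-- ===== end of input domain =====

-- B replaces A's per-start rescan by one right-to-left monotonic-stack pass that memoizes
-- and shares each greedy chain (objective: alternative decomposition).

-- ===== PORT A =====
def order_sublist (ls : List Int) : List (List Int) :=
  (PySem.List.pyRange 0 ls.length 1).foldl (fun res i =>
    let temp := PySem.List.pyGetD ls i 0
    let inner := (PySem.List.pyRange i ls.length 1).foldl
      (fun (st : Int × List Int) j =>
        let x := PySem.List.pyGetD ls j 0
        if st.1 < x then (x, st.2 ++ [x]) else st)
      (temp, [temp])
    if 1 < inner.2.length then res ++ [inner.2] else res) []

-- ===== PORT B =====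
-- Python's stack/chains lists have their most recent element at the END; the port keeps the
-- most recent element at the HEAD, so 'stack.pop()' while top ≤ x is dropWhile, 'chains.append'
-- + final 'chains.reverse()' is cons accumulation in the foldr (= the 'for x in reversed(ls)' loop).
def order_sublist_alt (ls : List Int) : List (List Int) :=
  let p := ls.foldr (fun x (s : List (Int × List Int) × List (List Int)) =>
      let stack := s.1.dropWhile (fun q => q.1 ≤ x)
      let chain := x :: (match stack with | (_, c) :: _ => c | [] => [])
      ((x, chain) :: stack, chain :: s.2))
    ([], [])
  p.2.filter (fun c => 1 < c.length)

-- ===== PRECONDITION & SPEC =====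
def Spec_order_sublist (ls : List Int) (out : List (List Int)) : Prop := out = order_sublist_alt ls
instance (ls : List Int) (out : List (List Int)) : Decidable (Spec_order_sublist ls out) := by unfold Spec_order_sublist; infer_instance

-- ===== CLAIM (what is proved, stated in full; the proofs are below) =====
def Claim_equal_order_sublist : Prop := ∀ (ls : List Int), Dom_order_sublist ls → Spec_order_sublist ls (order_sublist ls)

-- ===== LEMMAS AND PROOFS =====

-- greedy strictly-increasing run continuing from current maximum t
def pvGreedy (t : Int) : List Int → List Int
  | [] => []
  | x :: xs => if t < x then x :: pvGreedy x xs else pvGreedy t xs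

-- the chain starting at each position
def pvChains : List Int → List (List Int)
  | [] => []
  | x :: xs => (x :: pvGreedy x xs) :: pvChains xs

-- final value of A's inner running maximum
def pvLast (t : Int) : List Int → Int
  | [] => t
  | x :: xs => if t < x then pvLast x xs else pvLast t xs

-- what B's stack answers: the chain of the first stack entry with value > t
def pvLookup (t : Int) (st : List (Int × List Int)) : List Int :=
  match st.dropWhile (fun q => q.1 ≤ t) with
  | (_, c) :: _ => c
  | [] => []

lemma inner_fold (xs : List Int) : ∀ (t : Int) (acc : List Int),
    xs.foldl (fun (st : Int × List Int) x => if st.1 < x then (x, st.2 ++ [x]) else st) (t, acc)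
      = (pvLast t xs, acc ++ pvGreedy t xs) := by
  induction xs with
  | nil => simp [pvGreedy, pvLast]
  | cons x xs ih =>
    intro t acc
    by_cases h : t < x <;> simp [pvGreedy, pvLast, h, ih]

lemma dropWhile_dropWhile_le (st : List (Int × List Int)) (x t : Int) (h : x ≤ t) :
    (st.dropWhile (fun q => q.1 ≤ x)).dropWhile (fun q => q.1 ≤ t)
      = st.dropWhile (fun q => q.1 ≤ t) := by
  induction st with
  | nil => simp
  | cons p st ih =>
    by_cases h1 : p.1 ≤ x
    · have h2 : p.1 ≤ t := le_trans h1 h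
      simp [h1, h2, ih]
    · simp [List.dropWhile_cons, h1]

lemma alt_fold (ls : List Int) :
    (∀ t, pvLookup t (ls.foldr (fun x (s : List (Int × List Int) × List (List Int)) =>
      let stack := s.1.dropWhile (fun q => q.1 ≤ x)
      let chain := x :: (match stack with | (_, c) :: _ => c | [] => [])
      ((x, chain) :: stack, chain :: s.2)) ([], [])).1 = pvGreedy t ls)
    ∧ (ls.foldr (fun x (s : List (Int × List Int) × List (List Int)) =>
      let stack := s.1.dropWhile (fun q => q.1 ≤ x)
      let chain := x :: (match stack with | (_, c) :: _ => c | [] => [])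
      ((x, chain) :: stack, chain :: s.2)) ([], [])).2 = pvChains ls := by
  induction ls with
  | nil => constructor <;> intros <;> simp [pvLookup, pvGreedy, pvChains]
  | cons x xs ih =>
    obtain ⟨ih1, ih2⟩ := ih
    constructor
    · intro t
      by_cases h : x ≤ t
      · have hnx : ¬ t < x := not_lt.mpr h
        simp only [List.foldr_cons, pvLookup, pvGreedy, List.dropWhile_cons]
        simp only [h, decide_true, if_true]
        rw [dropWhile_dropWhile_le _ x t h]
        have := ih1 t
        simp only [pvLookup] at this
        simp [this, hnx]
      · have hx : t < x := lt_of_not_ge h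
        simp only [List.foldr_cons, pvLookup, pvGreedy, List.dropWhile_cons]
        simp only [h, decide_false]
        have := ih1 x
        simp only [pvLookup] at this
        simp [hx, this]
    · simp only [List.foldr_cons, pvChains]
      have := ih1 x
      simp only [pvLookup] at this
      simp [ih2, this]

lemma alt_eq (ls : List Int) :
    order_sublist_alt ls = (pvChains ls).filter (fun c => 1 < c.length) := by
  have h := (alt_fold ls).2
  simp only [order_sublist_alt]
  rw [h]

lemma greedy_self (t : Int) (xs : List Int) : pvGreedy t (t :: xs) = pvGreedy t xs := by
  simp [pvGreedy]

lemma a_fold (ls : List Int) (k : Nat) : ∀ (a : Nat) (res : List (List Int)),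
    ls.length = a + k →
    (PySem.List.pyRange (a : Int) ls.length 1).foldl (fun res i =>
      let temp := PySem.List.pyGetD ls i 0
      let inner := (PySem.List.pyRange i ls.length 1).foldl
        (fun (st : Int × List Int) j =>
          let x := PySem.List.pyGetD ls j 0
          if st.1 < x then (x, st.2 ++ [x]) else st)
        (temp, [temp])
      if 1 < inner.2.length then res ++ [inner.2] else res) res
    = res ++ (pvChains (ls.drop a)).filter (fun c => 1 < c.length) := by
  induction k with
  | zero =>
    intro a res h
    rw [PySem.List.pyRange_one_eq_nil (by omega)]
    have hd : ls.drop a = [] := List.drop_of_length_le (by omega)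
    simp [hd, pvChains]
  | succ k ih =>
    intro a res h
    have ha : a < ls.length := by omega
    rw [PySem.List.pyRange_one_cons (by exact_mod_cast ha)]
    simp only [List.foldl_cons]
    have hget : PySem.List.pyGetD ls (a : Int) 0 = ls[a] := by
      rw [PySem.List.pyGetD_natCast]; exact List.getD_eq_getElem ls 0 ha
    have hdrop : ls.drop a = ls[a] :: ls.drop (a + 1) := List.drop_eq_getElem_cons ha
    have hinner : (PySem.List.pyRange (a : Int) ls.length 1).foldl
        (fun (st : Int × List Int) j =>
          let x := PySem.List.pyGetD ls j 0
          if st.1 < x then (x, st.2 ++ [x]) else st)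
        (PySem.List.pyGetD ls (a : Int) 0, [PySem.List.pyGetD ls (a : Int) 0])
        = (pvLast ls[a] (ls.drop a), ls[a] :: pvGreedy ls[a] (ls.drop (a + 1))) := by
      rw [show (fun (st : Int × List Int) j =>
            let x := PySem.List.pyGetD ls j 0
            if st.1 < x then (x, st.2 ++ [x]) else st)
          = (fun (st : Int × List Int) j =>
              (fun (st : Int × List Int) x => if st.1 < x then (x, st.2 ++ [x]) else st)
                st (PySem.List.pyGetD ls j 0)) from rfl]
      rw [PySem.List.foldl_pyRange_pyGetD' ls 0
        (fun (st : Int × List Int) x => if st.1 < x then (x, st.2 ++ [x]) else st)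
        _ (Int.natCast_nonneg a)]
      rw [hget, inner_fold]
      simp only [Int.toNat_natCast, hdrop, greedy_self]
      simp
    have hcast : ((a : Int) + 1) = ((a + 1 : Nat) : Int) := by push_cast; ring
    simp only [hinner, hcast]
    rw [ih (a + 1) _ (by omega)]
    rw [hdrop]
    simp only [pvChains, List.filter_cons]
    by_cases hg : 0 < (pvGreedy ls[a] (ls.drop (a + 1))).length
    · simp [hg]
    · simp [hg]

lemma a_eq (ls : List Int) :
    order_sublist ls = (pvChains ls).filter (fun c => 1 < c.length) := by
  unfold order_sublist
  have := a_fold ls ls.length 0 [] (by omega)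
  simpa using this

-- ===== VERDICT (by name: the statement is the Claim_ definition above) =====
theorem order_sublist_spec : Claim_equal_order_sublist := by
  intro ls _
  unfold Spec_order_sublist
  rw [a_eq, alt_eq]
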